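-- pv_equiv track=rewrite | github.com/Rahul12344/bert-geometry | src/embedder/create_sentence_embeddings.py | match_tokenized_to_untokenized
-- ===== SOURCE A (Python) =====
-- from collections import defaultdict
--
-- def match_tokenized_to_untokenized(tokenized_sent, untokenized_sent):
--     token_mapping = defaultdict(list)
--     untokenized_sent_index = 0
--     tokenized_sent_index = 0
--     while (untokenized_sent_index < len(untokenized_sent) and tokenized_sent_index < len(tokenized_sent)):
--         while (tokenized_sent_index + 1 < len(tokenized_sent) and tokenized_sent[tokenized_sent_index + 1].startswith('##')):
--             token_mapping[untokenized_sent_index].append(tokenized_sent_index)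
--             tokenized_sent_index += 1
--         token_mapping[untokenized_sent_index].append(tokenized_sent_index)
--         untokenized_sent_index += 1
--         tokenized_sent_index += 1
--     return token_mapping
-- ===== SOURCE B (Python) =====
-- from collections import defaultdict
--
-- def match_tokenized_to_untokenized(tokenized_sent, untokenized_sent):
--     token_mapping = defaultdict(list)
--     word = -1
--     for i, tok in enumerate(tokenized_sent):
--         if i == 0 or not tok.startswith('##'):
--             word += 1
--         if word < len(untokenized_sent):
--             token_mapping[word].append(i)
--     return token_mapping
-- ===== Notes on version B (the rewrite author's own statement) =====
-- stated objective: simpler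
-- what changed: Replaces A's nested two-index while loops (an inner scan that groups '##'-continuation subwords per word) by one flat pass over enumerate(tokenized_sent) with a word counter that increments on each non-'##' token (and on the first token), appending only while the counter is below len(untokenized_sent).
import Mathlib
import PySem

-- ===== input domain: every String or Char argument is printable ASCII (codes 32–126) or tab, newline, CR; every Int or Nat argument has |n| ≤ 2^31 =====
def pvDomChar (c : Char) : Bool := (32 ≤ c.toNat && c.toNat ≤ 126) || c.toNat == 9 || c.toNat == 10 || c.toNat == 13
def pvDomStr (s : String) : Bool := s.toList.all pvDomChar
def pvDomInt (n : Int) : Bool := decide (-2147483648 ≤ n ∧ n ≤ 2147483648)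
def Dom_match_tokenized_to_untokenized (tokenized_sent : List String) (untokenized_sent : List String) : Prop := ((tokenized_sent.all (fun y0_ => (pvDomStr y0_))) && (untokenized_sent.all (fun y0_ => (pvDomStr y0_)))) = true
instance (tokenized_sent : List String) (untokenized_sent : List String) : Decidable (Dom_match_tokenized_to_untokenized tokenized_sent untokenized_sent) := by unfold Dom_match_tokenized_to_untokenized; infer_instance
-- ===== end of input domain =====

-- B replaces A's nested two-index while loops by one flat pass with a word counter ("simpler"); same return value.
-- Both loop ports carry a Nat fuel (initialised to len(tokenized_sent), enough for every iteration) purely as a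
-- structural-termination guard; it never changes which branch runs.

-- defaultdict(list) append: token_mapping[k].append(i)
def pvApp (d : PySem.Dict Int (List Int)) (k : Int) (i : Int) : PySem.Dict Int (List Int) :=
  d.modify k [] (· ++ [i])

-- ===== PORT A =====
-- inner while: while tokenized_sent[tokenized_sent_index+1].startswith('##'): append, advance
def aInner (fuel : Nat) (t : List String) (ui ti : Nat) (d : PySem.Dict Int (List Int)) :
    Nat × PySem.Dict Int (List Int) :=
  match fuel with
  | 0 => (ti, d)
  | fuel + 1 =>
    if h : ti + 1 < t.length then
      if PySem.Str.startswith (t[ti + 1]'h) "##" then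
        aInner fuel t ui (ti + 1) (pvApp d (ui : Int) (ti : Int))
      else (ti, d)
    else (ti, d)

-- outer while loop of A
def aOuter (fuel : Nat) (t u : List String) (ui ti : Nat) (d : PySem.Dict Int (List Int)) :
    PySem.Dict Int (List Int) :=
  match fuel with
  | 0 => d
  | fuel + 1 =>
    if ui < u.length ∧ ti < t.length then
      let p := aInner t.length t ui ti d
      aOuter fuel t u (ui + 1) (p.1 + 1) (pvApp p.2 (ui : Int) (p.1 : Int))
    else d

def match_tokenized_to_untokenized (tokenized_sent : List String) (untokenized_sent : List String) : List (Int × List Int) :=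
  (aOuter tokenized_sent.length tokenized_sent untokenized_sent 0 0 PySem.Dict.empty).items

-- ===== PORT B =====
-- flat for-loop over enumerate(tokenized_sent) with a word counter starting at -1
def bGo (fuel : Nat) (t u : List String) (i : Nat) (w : Int) (d : PySem.Dict Int (List Int)) :
    PySem.Dict Int (List Int) :=
  match fuel with
  | 0 => d
  | fuel + 1 =>
    if h : i < t.length then
      let w' := if i == 0 || !(PySem.Str.startswith (t[i]'h) "##") then w + 1 else w
      bGo fuel t u (i + 1) w' (if w' < PySem.List.len u then pvApp d w' (i : Int) else d)
    else d

def match_tokenized_to_untokenized_alt (tokenized_sent : List String) (untokenized_sent : List String) : List (Int × List Int) :=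
  (bGo tokenized_sent.length tokenized_sent untokenized_sent 0 (-1) PySem.Dict.empty).items

-- ===== PRECONDITION & SPEC =====
def Spec_match_tokenized_to_untokenized (tokenized_sent : List String) (untokenized_sent : List String) (out : List (Int × List Int)) : Prop := out = match_tokenized_to_untokenized_alt tokenized_sent untokenized_sent
instance (tokenized_sent : List String) (untokenized_sent : List String) (out : List (Int × List Int)) : Decidable (Spec_match_tokenized_to_untokenized tokenized_sent untokenized_sent out) := by unfold Spec_match_tokenized_to_untokenized; infer_instance

-- ===== CLAIM (what is proved, stated in full; the proofs are below) =====
def Claim_equal_match_tokenized_to_untokenized : Prop := ∀ (tokenized_sent : List String) (untokenized_sent : List String), Dom_match_tokenized_to_untokenized tokenized_sent untokenized_sent → Spec_match_tokenized_to_untokenized tokenized_sent untokenized_sent (match_tokenized_to_untokenized tokenized_sent untokenized_sent)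

-- ===== LEMMAS AND PROOFS =====

-- past the end of the token list, bGo returns its dict whatever the fuel
theorem bGo_stop (f : Nat) (t u : List String) (i : Nat) (w : Int) (d : PySem.Dict Int (List Int))
    (h : ¬ i < t.length) : bGo f t u i w d = d := by
  cases f <;> simp [bGo, h]

-- with enough fuel, the fuel does not matter
theorem bGo_irrel (t u : List String) : ∀ (f f' i : Nat) (w : Int) (d : PySem.Dict Int (List Int)),
    t.length ≤ f + i → t.length ≤ f' + i → bGo f t u i w d = bGo f' t u i w d := by
  intro f
  induction f with
  | zero =>
    intro f' i w d hf hf'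
    rw [bGo_stop 0 t u i w d (by omega), bGo_stop f' t u i w d (by omega)]
  | succ f ih =>
    intro f' i w d hf hf'
    by_cases h : i < t.length
    · obtain ⟨f'', rfl⟩ : ∃ f'', f' = f'' + 1 := ⟨f' - 1, by omega⟩
      simp only [bGo, h, dif_pos]
      exact ih f'' (i + 1) _ _ (by omega) (by omega)
    · rw [bGo_stop _ t u i w d h, bGo_stop _ t u i w d h]

-- one step of bGo at canonical fuel t.length
theorem bGo_step (t u : List String) (i : Nat) (w : Int) (d : PySem.Dict Int (List Int))
    (h : i < t.length) :
    bGo t.length t u i w d =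
      bGo t.length t u (i + 1)
        (if i == 0 || !(PySem.Str.startswith (t[i]'h) "##") then w + 1 else w)
        (if (if i == 0 || !(PySem.Str.startswith (t[i]'h) "##") then w + 1 else w) < PySem.List.len u
          then pvApp d (if i == 0 || !(PySem.Str.startswith (t[i]'h) "##") then w + 1 else w) (i : Int)
          else d) := by
  obtain ⟨n, hn⟩ : ∃ n, t.length = n + 1 := ⟨t.length - 1, by omega⟩
  conv_lhs => rw [hn]
  simp only [bGo, h, dif_pos]
  exact bGo_irrel t u n t.length (i + 1) _ _ (by omega) (by omega)

-- once the word counter has reached len(u), B never writes again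
theorem bGo_ge (t u : List String) : ∀ (f i : Nat) (w : Int) (d : PySem.Dict Int (List Int)),
    (u.length : Int) ≤ w → bGo f t u i w d = d := by
  intro f
  induction f with
  | zero => intro i w d _; rfl
  | succ f ih =>
    intro i w d hw
    by_cases h : i < t.length
    · simp only [bGo, h, dif_pos]
      have hw' : (u.length : Int) ≤ (if (i == 0 || !(PySem.Str.startswith (t[i]'h) "##")) = true then w + 1 else w) := by
        split <;> omega
      have hnl : ¬ ((if (i == 0 || !(PySem.Str.startswith (t[i]'h) "##")) = true then w + 1 else w) < PySem.List.len u) := by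
        rw [PySem.List.len_eq]; omega
      rw [if_neg hnl]
      exact ih (i + 1) _ d hw' 
    · exact bGo_stop _ t u i w d h

-- the intermediate index of the inner while never decreases
theorem aInner_le (f : Nat) (t : List String) (ui ti : Nat) (d : PySem.Dict Int (List Int)) :
    ti ≤ (aInner f t ui ti d).1 := by
  fun_induction aInner <;> (simp_all; try omega)

-- the token just after where the inner while stops does not start with '##'
theorem aInner_exit (t : List String) : ∀ (f ti ui : Nat) (d : PySem.Dict Int (List Int)),
    t.length ≤ f + ti + 1 →
    ∀ (h : (aInner f t ui ti d).1 + 1 < t.length),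
    PySem.Str.startswith (t[(aInner f t ui ti d).1 + 1]'h) "##" = false := by
  intro f
  induction f with
  | zero =>
    intro ti ui d hf h
    simp only [aInner] at h
    omega
  | succ f ih =>
    intro ti ui d hf
    by_cases h1 : ti + 1 < t.length
    · by_cases h2 : PySem.Str.startswith (t[ti + 1]'h1) "##" = true
      · have e : aInner (f + 1) t ui ti d = aInner f t ui (ti + 1) (pvApp d (ui : Int) (ti : Int)) := by
          simp only [aInner]; rw [dif_pos h1, if_pos h2]
        rw [e]
        exact ih (ti + 1) ui _ (by omega)
      · have e : aInner (f + 1) t ui ti d = (ti, d) := by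
          simp only [aInner]; rw [dif_pos h1, if_neg h2]
        rw [e]
        intro h
        simpa using h2
    · have e : aInner (f + 1) t ui ti d = (ti, d) := by simp only [aInner]; rw [dif_neg h1]
      rw [e]
      intro h
      omega

-- B's run over one '##'-continuation chunk matches A's inner while plus its final append
theorem sim_inner (t u : List String) (ui : Nat) (hui : ui < u.length) :
    ∀ (f ti : Nat) (d : PySem.Dict Int (List Int)), t.length ≤ f + ti + 1 → ti < t.length →
    bGo t.length t u (ti + 1) (ui : Int) (pvApp d (ui : Int) (ti : Int)) =
      bGo t.length t u ((aInner f t ui ti d).1 + 1) (ui : Int)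
        (pvApp (aInner f t ui ti d).2 (ui : Int) ((aInner f t ui ti d).1 : Int)) := by
  intro f
  induction f with
  | zero =>
    intro ti d hf hti
    rfl
  | succ f ih =>
    intro ti d hf hti
    by_cases h1 : ti + 1 < t.length
    · by_cases h2 : PySem.Str.startswith (t[ti + 1]'h1) "##" = true
      · have e : aInner (f + 1) t ui ti d = aInner f t ui (ti + 1) (pvApp d (ui : Int) (ti : Int)) := by
          simp only [aInner]; rw [dif_pos h1, if_pos h2]
        rw [e, ← ih (ti + 1) (pvApp d (ui : Int) (ti : Int)) (by omega) h1]
        rw [bGo_step t u (ti + 1) (ui : Int) (pvApp d (ui : Int) (ti : Int)) h1]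
        have hne : (ti + 1 == 0) = false := by simp
        simp only [hne, h2, Bool.not_true, Bool.or_false, Bool.false_eq_true, if_false]
        rw [if_pos (by simp only [PySem.List.len_eq]; exact_mod_cast hui)]
      · have e : aInner (f + 1) t ui ti d = (ti, d) := by
          simp only [aInner]; rw [dif_pos h1, if_neg h2]
        rw [e]
    · have e : aInner (f + 1) t ui ti d = (ti, d) := by simp only [aInner]; rw [dif_neg h1]
      rw [e]

-- main simulation: A's outer loop at a word boundary equals B's flat loop
theorem sim (t u : List String) : ∀ (fa ti ui : Nat) (d : PySem.Dict Int (List Int)),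
    t.length ≤ fa + ti → ui ≤ u.length →
    (∀ h : ti < t.length, ti = 0 ∨ PySem.Str.startswith (t[ti]'h) "##" = false) →
    aOuter fa t u ui ti d = bGo t.length t u ti ((ui : Int) - 1) d := by
  intro fa
  induction fa with
  | zero =>
    intro ti ui d hfa hui hstart
    rw [show aOuter 0 t u ui ti d = d from rfl, bGo_stop _ t u ti _ d (by omega)]
  | succ fa ih =>
    intro ti ui d hfa hui hstart
    by_cases hti : ti < t.length
    · have hcond : (ti == 0 || !(PySem.Str.startswith (t[ti]'hti) "##")) = true := by
        rcases hstart hti with h0 | hns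
        · simp [h0]
        · simp only [hns, Bool.not_false, Bool.or_true]
      rw [bGo_step t u ti ((ui : Int) - 1) d hti]
      simp only [hcond, if_pos]
      have e1 : (ui : Int) - 1 + 1 = (ui : Int) := by ring
      rw [e1]
      by_cases huim : ui < u.length
      · -- A runs one full outer iteration
        have ea : aOuter (fa + 1) t u ui ti d =
            aOuter fa t u (ui + 1) ((aInner t.length t ui ti d).1 + 1)
              (pvApp (aInner t.length t ui ti d).2 (ui : Int) ((aInner t.length t ui ti d).1 : Int)) := by
          simp [aOuter, huim, hti]
        rw [ea, if_pos (by simp only [PySem.List.len_eq]; exact_mod_cast huim)]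
        rw [sim_inner t u ui huim t.length ti d (by omega) hti]
        have hle := aInner_le t.length t ui ti d
        rw [ih ((aInner t.length t ui ti d).1 + 1) (ui + 1) _ (by omega) (by omega)
          (fun h => Or.inr (aInner_exit t t.length ti ui d (by omega) h))]
        have e2 : ((ui + 1 : Nat) : Int) - 1 = (ui : Int) := by push_cast; ring
        rw [e2]
      · -- ui = len(u): A stops; B writes nothing more
        have ea : aOuter (fa + 1) t u ui ti d = d := by simp [aOuter, huim]
        rw [ea, if_neg (by simp only [PySem.List.len_eq]; omega)]
        rw [bGo_ge t u t.length (ti + 1) (ui : Int) d (by omega)]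
    · have ea : aOuter (fa + 1) t u ui ti d = d := by simp [aOuter, hti]
      rw [ea, bGo_stop _ t u ti _ d hti]

-- ===== VERDICT (by name: the statement is the Claim_ definition above) =====
theorem match_tokenized_to_untokenized_spec : Claim_equal_match_tokenized_to_untokenized := by
  intro t u _
  unfold Spec_match_tokenized_to_untokenized
  unfold match_tokenized_to_untokenized match_tokenized_to_untokenized_alt
  rw [sim t u t.length 0 0 PySem.Dict.empty (by omega) (by omega) (fun _ => Or.inl rfl)]
  norm_num
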